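-- pv_equiv track=rewrite | github.com/kingnhcomcast/modtracker | mod_download_tracker.py | canonical_loader_group
-- ===== SOURCE A (Python) =====
-- def parse_csv_field(value: str | None) -> list[str]:
--     if not value:
--         return []
--     return [x.strip() for x in value.split(",") if x.strip()]
--
-- def canonical_loader_group(loaders_csv: str) -> str:
--     loaders = {x.strip().lower() for x in parse_csv_field(loaders_csv)}
--     if "fabric" in loaders:
--         return "fabric"
--     if "neoforge" in loaders:
--         return "neoforge"
--     if "forge" in loaders:
--         return "forge"
--     if "quilt" in loaders:
--         return "quilt"
--     return "unknown"
-- ===== SOURCE B (Python) =====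
-- def canonical_loader_group(loaders_csv: str) -> str:
--     rank = {"fabric": 0, "neoforge": 1, "forge": 2, "quilt": 3}
--     names = ["fabric", "neoforge", "forge", "quilt", "unknown"]
--     best = 4
--     for piece in loaders_csv.split(","):
--         r = rank.get(piece.strip().lower(), 4)
--         if r < best:
--             best = r
--     return names[best]
-- ===== Notes on version B (the rewrite author's own statement) =====
-- stated objective: alternative
-- what changed: Replaces building a set followed by four ordered membership probes with a single pass over the CSV pieces that keeps the minimum priority rank (dict lookup) and indexes a name table; the helper and the set disappear.
import Mathlib
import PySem

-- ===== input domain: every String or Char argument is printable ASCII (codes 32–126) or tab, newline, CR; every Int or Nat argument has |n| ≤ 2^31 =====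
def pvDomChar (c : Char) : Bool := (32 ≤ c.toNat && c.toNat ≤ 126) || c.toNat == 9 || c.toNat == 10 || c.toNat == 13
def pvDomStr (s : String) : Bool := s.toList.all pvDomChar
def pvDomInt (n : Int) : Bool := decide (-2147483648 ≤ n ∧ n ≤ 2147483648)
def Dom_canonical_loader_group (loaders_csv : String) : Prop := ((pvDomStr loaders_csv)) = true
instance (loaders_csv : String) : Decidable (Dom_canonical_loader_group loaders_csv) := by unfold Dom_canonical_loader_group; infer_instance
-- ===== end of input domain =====

-- B replaces A's set-then-four-membership-probes with one pass keeping the minimum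
-- priority rank looked up in a dict, indexing a name table (alternative decomposition).

-- ===== PORT A =====
def parse_csv_field (value : String) : List String :=
  if value = "" then []
  else
    ((PySem.Chars.splitOn value.toList [',']).map String.ofList).filterMap
      (fun x => let t := PySem.Str.strip x; if t ≠ "" then some t else none)

def canonical_loader_group (loaders_csv : String) : String :=
  let loaders : PySem.Set String :=
    PySem.Set.ofList
      ((parse_csv_field loaders_csv).map (fun x => PySem.Str.lower (PySem.Str.strip x)))
  if PySem.Set.contains loaders "fabric" then "fabric"
  else if PySem.Set.contains loaders "neoforge" then "neoforge"
  else if PySem.Set.contains loaders "forge" then "forge"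
  else if PySem.Set.contains loaders "quilt" then "quilt"
  else "unknown"

-- ===== PORT B =====
def loaderRank : PySem.Dict String Int :=
  PySem.Dict.ofList [("fabric", 0), ("neoforge", 1), ("forge", 2), ("quilt", 3)]

def loaderNames : List String := ["fabric", "neoforge", "forge", "quilt", "unknown"]

def canonical_loader_group_alt (loaders_csv : String) : String :=
  let best : Int :=
    ((PySem.Chars.splitOn loaders_csv.toList [',']).map String.ofList).foldl
      (fun b piece =>
        let r := PySem.Dict.getD loaderRank (PySem.Str.lower (PySem.Str.strip piece)) 4
        if r < b then r else b) 4
  PySem.List.pyGetD loaderNames best "unknown"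

-- ===== PRECONDITION & SPEC =====
def Spec_canonical_loader_group (loaders_csv : String) (out : String) : Prop := out = canonical_loader_group_alt loaders_csv
instance (loaders_csv : String) (out : String) : Decidable (Spec_canonical_loader_group loaders_csv out) := by unfold Spec_canonical_loader_group; infer_instance

-- ===== CLAIM (what is proved, stated in full; the proofs are below) =====
def Claim_equal_canonical_loader_group : Prop := ∀ (loaders_csv : String), Dom_canonical_loader_group loaders_csv → Spec_canonical_loader_group loaders_csv (canonical_loader_group loaders_csv)

-- ===== LEMMAS AND PROOFS =====

theorem dw_dw {α} (p : α → Bool) (l : List α) :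
    List.dropWhile p (List.dropWhile p l) = List.dropWhile p l := by
  cases h : List.dropWhile p l with
  | nil => simp
  | cons a t =>
    have := List.head_dropWhile_not p (l := l) (by simp [h])
    simp only [h, List.head_cons] at this
    simp [this]

theorem rstrip_rstrip (l : List Char) :
    PySem.Chars.rstrip (PySem.Chars.rstrip l) = PySem.Chars.rstrip l := by
  simp [PySem.Chars.rstrip, dw_dw]

theorem strip_strip (l : List Char) :
    PySem.Chars.strip (PySem.Chars.strip l) = PySem.Chars.strip l := by
  unfold PySem.Chars.strip PySem.Chars.lstrip
  cases h : List.dropWhile PySem.Chars.isspace l with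
  | nil => simp [PySem.Chars.rstrip]
  | cons a t =>
    have ha := List.head_dropWhile_not PySem.Chars.isspace (l := l) (by simp [h])
    simp only [h, List.head_cons] at ha
    have hpre : PySem.Chars.rstrip (a :: t) <+: a :: t := by
      have h1 := List.dropWhile_suffix (l := (a :: t).reverse) PySem.Chars.isspace
      have h2 := List.reverse_prefix.mpr h1
      simpa [PySem.Chars.rstrip] using h2
    cases hr : PySem.Chars.rstrip (a :: t) with
    | nil => simp [PySem.Chars.rstrip]
    | cons b u =>
      rw [hr] at hpre
      have hb : b = a := by
        rcases hpre with ⟨w, hw⟩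
        simpa using congrArg (·.head?) hw
      have hdw : List.dropWhile PySem.Chars.isspace (b :: u) = b :: u := by
        rw [List.dropWhile_cons, hb, ha]; simp
      rw [hdw]
      simpa [hr] using rstrip_rstrip (a :: t)

theorem str_strip_strip (x : String) :
    PySem.Str.strip (PySem.Str.strip x) = PySem.Str.strip x := by
  simp [PySem.Str.strip, strip_strip]

-- the rank of a lowered token, as A's if-chain sees it
def rk (t : String) : Int := PySem.Dict.getD loaderRank t 4

theorem rk_eq (t : String) : rk t =
    if t = "fabric" then 0 else if t = "neoforge" then 1
    else if t = "forge" then 2 else if t = "quilt" then 3 else 4 := by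
  have h : loaderRank = PySem.Dict.mk [("fabric", 0), ("neoforge", 1), ("forge", 2), ("quilt", 3)] := by decide
  rw [rk, h, PySem.Dict.getD_eq_get?_getD]
  simp only [PySem.Dict.get?_mk_cons, beq_iff_eq]
  by_cases h1 : t = "fabric" <;> by_cases h2 : t = "neoforge" <;> by_cases h3 : t = "forge" <;>
    by_cases h4 : t = "quilt" <;>
    simp_all [eq_comm, PySem.Dict.get?]

-- the fold of B over a list of lowered tokens
def F (l : List String) (b : Int) : Int :=
  l.foldl (fun b t => if rk t < b then rk t else b) b

theorem F_nonneg (l : List String) (b : Int) (hb : 0 ≤ b) : 0 ≤ F l b := by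
  induction l generalizing b with
  | nil => simpa [F]
  | cons a t ih =>
    have h0 : (0:Int) ≤ rk a := by rw [rk_eq]; split_ifs <;> norm_num
    simp only [F, List.foldl_cons]
    by_cases h : rk a < b <;> simp only [h, if_pos, ite_false] <;>
      exact ih _ (by omega)

theorem F_le_iff (l : List String) (b k : Int) :
    F l b ≤ k ↔ b ≤ k ∨ ∃ t ∈ l, rk t ≤ k := by
  induction l generalizing b with
  | nil => simp [F]
  | cons a t ih =>
    simp only [F, List.foldl_cons] at *
    by_cases h : rk a < b
    · simp only [if_pos h, ih]
      constructor
      · rintro (h1 | ⟨u, hu, h2⟩)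
        · exact Or.inr ⟨a, List.mem_cons_self .., h1⟩
        · exact Or.inr ⟨u, List.mem_cons_of_mem _ hu, h2⟩
      · rintro (h1 | ⟨u, hu, h2⟩)
        · exact Or.inl (by omega)
        · rcases List.mem_cons.mp hu with rfl | hu'
          · exact Or.inl h2
          · exact Or.inr ⟨u, hu', h2⟩
    · simp only [if_neg h, ih]
      constructor
      · rintro (h1 | ⟨u, hu, h2⟩)
        · exact Or.inl h1
        · exact Or.inr ⟨u, List.mem_cons_of_mem _ hu, h2⟩
      · rintro (h1 | ⟨u, hu, h2⟩)
        · exact Or.inl h1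
        · rcases List.mem_cons.mp hu with rfl | hu'
          · exact Or.inl (by omega)
          · exact Or.inr ⟨u, hu', h2⟩

theorem rk_le3 (t : String) (h : rk t ≤ 3) :
    t = "fabric" ∨ t = "neoforge" ∨ t = "forge" ∨ t = "quilt" := by
  rw [rk_eq] at h; split_ifs at h <;> simp_all

theorem main_lemma (ts : List String) :
    (if "fabric" ∈ ts then "fabric" else if "neoforge" ∈ ts then "neoforge"
     else if "forge" ∈ ts then "forge" else if "quilt" ∈ ts then "quilt" else "unknown")
    = PySem.List.pyGetD loaderNames (F ts 4) "unknown" := by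
  have h0 : 0 ≤ F ts 4 := F_nonneg ts 4 (by norm_num)
  have hrkF : rk "fabric" = 0 := by rw [rk_eq]; simp
  have hrkN : rk "neoforge" = 1 := by rw [rk_eq]; simp
  have hrkFo : rk "forge" = 2 := by rw [rk_eq]; simp
  have hrkQ : rk "quilt" = 3 := by rw [rk_eq]; simp
  by_cases hf : "fabric" ∈ ts
  · have : F ts 4 ≤ 0 := (F_le_iff ts 4 0).mpr (Or.inr ⟨_, hf, by omega⟩)
    have hm : F ts 4 = 0 := by omega
    simp [hf, hm]; decide
  · by_cases hn : "neoforge" ∈ ts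
    · have h1 : F ts 4 ≤ 1 := (F_le_iff ts 4 1).mpr (Or.inr ⟨_, hn, by omega⟩)
      have hn0 : ¬ F ts 4 ≤ 0 := by
        intro hc
        rcases (F_le_iff ts 4 0).mp hc with hc | ⟨u, hu, hc⟩
        · omega
        · rcases rk_le3 u (by omega) with rfl | rfl | rfl | rfl
          · exact hf hu
          · rw [hrkN] at hc; omega
          · rw [hrkFo] at hc; omega
          · rw [hrkQ] at hc; omega
      have hm : F ts 4 = 1 := by omega
      simp [hf, hn, hm]; decide
    · by_cases hfo : "forge" ∈ ts
      · have h2 : F ts 4 ≤ 2 := (F_le_iff ts 4 2).mpr (Or.inr ⟨_, hfo, by omega⟩)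
        have hn1 : ¬ F ts 4 ≤ 1 := by
          intro hc
          rcases (F_le_iff ts 4 1).mp hc with hc | ⟨u, hu, hc⟩
          · omega
          · rcases rk_le3 u (by omega) with rfl | rfl | rfl | rfl
            · exact hf hu
            · exact hn hu
            · rw [hrkFo] at hc; omega
            · rw [hrkQ] at hc; omega
        have hm : F ts 4 = 2 := by omega
        simp [hf, hn, hfo, hm]; decide
      · by_cases hq : "quilt" ∈ ts
        · have h3 : F ts 4 ≤ 3 := (F_le_iff ts 4 3).mpr (Or.inr ⟨_, hq, by omega⟩)
          have hn2 : ¬ F ts 4 ≤ 2 := by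
            intro hc
            rcases (F_le_iff ts 4 2).mp hc with hc | ⟨u, hu, hc⟩
            · omega
            · rcases rk_le3 u (by omega) with rfl | rfl | rfl | rfl
              · exact hf hu
              · exact hn hu
              · exact hfo hu
              · rw [hrkQ] at hc; omega
          have hm : F ts 4 = 3 := by omega
          simp [hf, hn, hfo, hq, hm]; decide
        · have hn3 : ¬ F ts 4 ≤ 3 := by
            intro hc
            rcases (F_le_iff ts 4 3).mp hc with hc | ⟨u, hu, hc⟩
            · omega
            · rcases rk_le3 u (by omega) with rfl | rfl | rfl | rfl <;> first | exact hf hu | exact hn hu | exact hfo hu | exact hq hu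
          have h4 : F ts 4 ≤ 4 := (F_le_iff ts 4 4).mpr (Or.inl le_rfl)
          have hm : F ts 4 = 4 := by omega
          simp [hf, hn, hfo, hq, hm]; decide

-- membership of a nonempty keyword in A's token list vs B's token list
theorem memA (w : String) (hw : w ≠ "") (pieces : List String) :
    (w ∈ (pieces.filterMap
            (fun x => if PySem.Str.strip x ≠ "" then some (PySem.Str.strip x) else none)).map
            (fun x => PySem.Str.lower (PySem.Str.strip x)))
    ↔ w ∈ pieces.map (fun x => PySem.Str.lower (PySem.Str.strip x)) := by
  simp only [List.mem_map, List.mem_filterMap]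
  constructor
  · rintro ⟨y, ⟨x, hx, hy⟩, rfl⟩
    by_cases h : PySem.Str.strip x = ""
    · simp [h] at hy
    · simp only [h, ne_eq, not_false_eq_true, if_pos] at hy
      cases hy
      exact ⟨x, hx, by rw [str_strip_strip]⟩
  · rintro ⟨x, hx, rfl⟩
    have hne : PySem.Str.strip x ≠ "" := by
      intro hc
      apply hw
      rw [hc]
      decide
    exact ⟨PySem.Str.strip x, ⟨x, hx, by simp [hne]⟩, (by rw [str_strip_strip])⟩

-- ===== VERDICT (by name: the statement is the Claim_ definition above) =====
theorem contains_ofList_iff (L : List String) (w : String) :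
    (PySem.Set.contains (PySem.Set.ofList L) w = true) ↔ w ∈ L := by
  have h1 : (PySem.Set.contains (PySem.Set.ofList L) w = true) ↔ w ∈ PySem.Set.ofList L := by
    simp [PySem.Set.contains]
  rw [h1]
  exact PySem.Set.mem_ofList L w

theorem canonical_loader_group_spec : Claim_equal_canonical_loader_group := by
  intro s _
  unfold Spec_canonical_loader_group
  by_cases hs : s = ""
  · subst hs; decide
  · simp only [canonical_loader_group, canonical_loader_group_alt, parse_csv_field, if_neg hs]
    have hB : List.foldl
        (fun (b : Int) (piece : String) =>
          if loaderRank.getD (PySem.Str.lower (PySem.Str.strip piece)) 4 < b then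
            loaderRank.getD (PySem.Str.lower (PySem.Str.strip piece)) 4
          else b)
        4 (List.map String.ofList (PySem.Chars.splitOn s.toList [',']))
        = F (((PySem.Chars.splitOn s.toList [',']).map String.ofList).map
              (fun x => PySem.Str.lower (PySem.Str.strip x))) 4 := by
      simp only [F, List.foldl_map, rk]
    rw [hB, ← main_lemma]
    have e1 := propext ((contains_ofList_iff _ "fabric").trans (memA "fabric" (by decide) ((PySem.Chars.splitOn s.toList [',']).map String.ofList)))
    have e2 := propext ((contains_ofList_iff _ "neoforge").trans (memA "neoforge" (by decide) ((PySem.Chars.splitOn s.toList [',']).map String.ofList)))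
    have e3 := propext ((contains_ofList_iff _ "forge").trans (memA "forge" (by decide) ((PySem.Chars.splitOn s.toList [',']).map String.ofList)))
    have e4 := propext ((contains_ofList_iff _ "quilt").trans (memA "quilt" (by decide) ((PySem.Chars.splitOn s.toList [',']).map String.ofList)))
    simp only [e1, e2, e3, e4]
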